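-- pv_equiv track=rewrite | github.com/zhaoxiaojia/wifi_test | src/ui/controller/tools_ai_chat_ctl.py | _updates_summary
-- ===== SOURCE A (Python) =====
-- def _updates_summary(updates: dict) -> str:
--     if not updates:
--         return "(no config changes)"
--     lines = []
--     for key in ("text_case", "csv_path"):
--         if key in updates:
--             lines.append(f"- {key}: {updates[key]}")
--     for key, value in updates.items():
--         if key in {"text_case", "csv_path"}:
--             continue
--         lines.append(f"- {key}: {value}")
--     return "\n".join(lines)
-- ===== SOURCE B (Python) =====
-- def _updates_summary(updates: dict) -> str:
--     if not updates:
--         return "(no config changes)"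
--     rank = {"text_case": 0, "csv_path": 1}
--     keys = sorted(updates, key=lambda k: rank.get(k, 2))
--     return "\n".join(f"- {k}: {updates[k]}" for k in keys)
-- ===== Notes on version B (the rewrite author's own statement) =====
-- stated objective: idiomatic
-- what changed: replaces A's two explicit accumulation loops (priority keys, then the rest) by one stable sort of the keys under a priority-rank table followed by a single join over a comprehension
import Mathlib
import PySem

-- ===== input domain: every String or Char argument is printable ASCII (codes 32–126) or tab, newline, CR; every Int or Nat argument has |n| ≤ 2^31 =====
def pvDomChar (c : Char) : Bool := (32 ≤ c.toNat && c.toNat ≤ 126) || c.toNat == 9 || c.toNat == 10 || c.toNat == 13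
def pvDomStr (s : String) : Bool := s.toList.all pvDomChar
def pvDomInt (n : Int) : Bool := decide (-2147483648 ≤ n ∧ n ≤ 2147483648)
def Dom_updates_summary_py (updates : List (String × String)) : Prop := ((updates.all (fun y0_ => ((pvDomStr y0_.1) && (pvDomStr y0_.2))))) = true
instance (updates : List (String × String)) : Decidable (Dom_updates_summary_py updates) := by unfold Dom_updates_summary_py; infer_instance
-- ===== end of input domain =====

-- B replaces A's two accumulation loops by a stable sort of the keys under a priority-rank
-- table followed by a single formatting pass (idiomatic; same result).


-- ===== PORT A =====
-- f"- {key}: {value}"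
def pvLine (k v : String) : String := PySem.Str.join "" ["- ", k, ": ", v]

def updates_summary_py (updates : List (String × String)) : String :=
  let d := PySem.Dict.ofList updates
  if d.items.isEmpty then "(no config changes)"
  else
    -- first loop: the two priority keys, in fixed order
    let lines : List String := (["text_case", "csv_path"] : List String).foldl
      (fun acc key => if d.contains key then acc ++ [pvLine key (d.getD key "")] else acc) []
    -- second loop: the remaining items, in insertion order
    let lines := d.items.foldl
      (fun acc kv => if kv.1 == "text_case" || kv.1 == "csv_path" then acc
                     else acc ++ [pvLine kv.1 kv.2]) lines
    PySem.Str.join "\n" lines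

-- ===== PORT B =====
def updates_summary_py_alt (updates : List (String × String)) : String :=
  let d := PySem.Dict.ofList updates
  if d.items.isEmpty then "(no config changes)"
  else
    let rank : PySem.Dict String Int := PySem.Dict.ofList [("text_case", 0), ("csv_path", 1)]
    let keys := PySem.List.sorted d.keys (fun k => rank.getD k 2)
    PySem.Str.join "\n" (keys.map (fun k => pvLine k (d.getD k "")))

-- ===== PRECONDITION & SPEC =====
def Spec_updates_summary_py (updates : List (String × String)) (out : String) : Prop := out = updates_summary_py_alt updates
instance (updates : List (String × String)) (out : String) : Decidable (Spec_updates_summary_py updates out) := by unfold Spec_updates_summary_py; infer_instance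

-- ===== CLAIM (what is proved, stated in full; the proofs are below) =====
def Claim_equal_updates_summary_py : Prop := ∀ (updates : List (String × String)), Dom_updates_summary_py updates → Spec_updates_summary_py updates (updates_summary_py updates)

-- ===== LEMMAS AND PROOFS =====

-- the rank function B's sort uses, written out
def pvRk (k : String) : Int := if k = "text_case" then 0 else if k = "csv_path" then 1 else 2

theorem pvRk_cases (k : String) : pvRk k = 0 ∨ pvRk k = 1 ∨ pvRk k = 2 := by
  unfold pvRk; split_ifs <;> simp

theorem pvRank_getD (k : String) :
    (PySem.Dict.ofList [("text_case", (0:Int)), ("csv_path", 1)]).getD k 2 = pvRk k := by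
  simp only [PySem.Dict.ofList, PySem.Dict.update, PySem.Dict.getD_insert, pvRk, List.foldl]
  split_ifs with h1 h2 <;> simp_all

-- stable insertion passes over elements it is not 'before'
theorem pvInsertBy_append {α : Type} (before : α → α → Bool) (x : α) (as bs : List α)
    (h : ∀ a ∈ as, before x a = false) :
    PySem.List.insertBy before x (as ++ bs) = as ++ PySem.List.insertBy before x bs := by
  induction as with
  | nil => simp
  | cons a t ih =>
    have ha := h a (by simp)
    rw [List.cons_append, PySem.List.insertBy, ha]
    simp only [Bool.false_eq_true, if_false, List.cons_append]
    rw [ih (fun a ha' => h a (by simp [ha']))]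

theorem pvInsertBy_front {α : Type} (before : α → α → Bool) (x : α) (bs : List α)
    (h : ∀ b ∈ bs, before x b = true) :
    PySem.List.insertBy before x bs = x :: bs := by
  cases bs with
  | nil => rfl
  | cons b t => rw [PySem.List.insertBy, h b (by simp)]; simp

-- the stable insertion-sort loop over a three-valued rank fills three buckets
theorem pvBucket (l : List String) (A B C : List String)
    (hA : ∀ a ∈ A, pvRk a = 0) (hB : ∀ b ∈ B, pvRk b = 1) (hC : ∀ c ∈ C, pvRk c = 2) :
    l.foldl (fun acc x => PySem.List.insertBy (fun a b => decide (pvRk a < pvRk b)) x acc) (A ++ B ++ C)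
      = (A ++ l.filter (fun k => pvRk k = 0)) ++ (B ++ l.filter (fun k => pvRk k = 1))
          ++ (C ++ l.filter (fun k => pvRk k = 2)) := by
  induction l generalizing A B C with
  | nil => simp
  | cons x t ih =>
    simp only [List.foldl_cons]
    rcases pvRk_cases x with hx | hx | hx
    · have step : PySem.List.insertBy (fun a b => decide (pvRk a < pvRk b)) x (A ++ B ++ C)
          = A ++ [x] ++ B ++ C := by
        rw [List.append_assoc, pvInsertBy_append _ _ _ _ (fun a ha => by simp [hA a ha, hx]),
            pvInsertBy_front _ _ _ (fun b hb => (List.mem_append.1 hb).elim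
              (fun h2 => by simp [hB b h2, hx]) (fun h2 => by simp [hC b h2, hx]))]
        simp
      rw [step, ih (A ++ [x]) B C
            (fun a ha => (List.mem_append.1 ha).elim (hA a)
              (fun h2 => by simp at h2; rw [h2]; exact hx)) hB hC]
      simp [hx]
    · have step : PySem.List.insertBy (fun a b => decide (pvRk a < pvRk b)) x (A ++ B ++ C)
          = A ++ (B ++ [x]) ++ C := by
        rw [pvInsertBy_append _ _ _ _ (fun a ha => (List.mem_append.1 ha).elim
              (fun h2 => by simp [hA a h2, hx]) (fun h2 => by simp [hB a h2, hx])),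
            pvInsertBy_front _ _ _ (fun b hb => by simp [hC b hb, hx])]
        simp
      rw [step, ih A (B ++ [x]) C hA
            (fun b hb => (List.mem_append.1 hb).elim (hB b)
              (fun h2 => by simp at h2; rw [h2]; exact hx)) hC]
      simp [hx]
    · have step : PySem.List.insertBy (fun a b => decide (pvRk a < pvRk b)) x (A ++ B ++ C)
          = A ++ B ++ (C ++ [x]) := by
        have h9 := pvInsertBy_append (fun a b => decide (pvRk a < pvRk b)) x (A ++ B ++ C) []
          (fun a ha => (List.mem_append.1 ha).elim
            (fun h1 => (List.mem_append.1 h1).elim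
              (fun h2 => by simp [hA a h2, hx]) (fun h2 => by simp [hB a h2, hx]))
            (fun h2 => by simp [hC a h2, hx]))
        simpa [PySem.List.insertBy] using h9
      rw [step, ih A B (C ++ [x]) hA hB
            (fun c hc => (List.mem_append.1 hc).elim (hC c)
              (fun h2 => by simp at h2; rw [h2]; exact hx))]
      simp [hx]

-- B's sorted key list is the three rank buckets in order
theorem pvSorted_eq (l : List String) :
    PySem.List.sorted l (fun k => pvRk k) false
      = l.filter (fun k => pvRk k = 0) ++ (l.filter (fun k => pvRk k = 1)
          ++ l.filter (fun k => pvRk k = 2)) := by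
  rw [PySem.List.sorted_eq_foldl_insertBy]
  have h := pvBucket l [] [] [] (by simp) (by simp) (by simp)
  simpa using h

-- on a duplicate-free list, filtering for one value yields that value iff present
theorem pvFilter_single (l : List String) (a : String) (hnd : l.Nodup) :
    l.filter (fun k => k = a) = if a ∈ l then [a] else [] := by
  induction l with
  | nil => simp
  | cons x t ih =>
    rcases List.nodup_cons.1 hnd with ⟨hx, ht⟩
    by_cases hxa : x = a
    · subst hxa
      simp [hx, ih ht]
    · simp [hxa, ih ht, Ne.symm hxa]

theorem pvRk_zero_iff (k : String) : (pvRk k = 0) ↔ k = "text_case" := by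
  unfold pvRk; split_ifs <;> simp_all

theorem pvRk_one_iff (k : String) : (pvRk k = 1) ↔ k = "csv_path" := by
  unfold pvRk; split_ifs <;> simp_all

-- ===== VERDICT (by name: the statement is the Claim_ definition above) =====
theorem updates_summary_py_spec : Claim_equal_updates_summary_py := by
  intro updates _
  unfold Spec_updates_summary_py updates_summary_py updates_summary_py_alt
  simp only []
  set d := PySem.Dict.ofList updates with hd
  by_cases hemp : d.items.isEmpty
  · simp [hemp]
  · simp only [hemp]
    have hnd : d.keys.Nodup := PySem.Dict.nodup_keys_ofList updates
    -- B's key function is pvRk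
    have hkey : (fun k => (PySem.Dict.ofList [("text_case", (0:Int)), ("csv_path", 1)]).getD k 2)
        = fun k => pvRk k := funext pvRank_getD
    rw [hkey, pvSorted_eq]
    -- A's second loop is a filter of the items
    have hloop2 : ∀ (init : List String), d.items.foldl
        (fun acc kv => if kv.1 == "text_case" || kv.1 == "csv_path" then acc
                       else acc ++ [pvLine kv.1 kv.2]) init
        = init ++ (d.items.filter (fun kv => !(kv.1 == "text_case" || kv.1 == "csv_path"))).map
            (fun kv => pvLine kv.1 kv.2) := by
      intro init
      rw [← PySem.List.foldl_append_if (fun kv => !(kv.1 == "text_case" || kv.1 == "csv_path"))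
            (fun kv => pvLine kv.1 kv.2) d.items init]
      apply PySem.List.foldl_congr_mem
      intro acc kv _
      by_cases h : (kv.1 == "text_case" || kv.1 == "csv_path") = true <;> simp [h]
    rw [hloop2]
    -- the items are the keys paired with their looked-up values
    have hitems : d.items = d.keys.map (fun k => (k, d.getD k "")) :=
      PySem.Dict.items_eq_map_keys d hnd ""
    rw [hitems, List.filter_map, List.map_map]
    -- the non-priority filter is the rank-2 bucket
    have hfilt2 : d.keys.filter ((fun kv => !(kv.1 == "text_case" || kv.1 == "csv_path")) ∘
          (fun k => (k, d.getD k ""))) = d.keys.filter (fun k => pvRk k = 2) := by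
      apply List.filter_congr
      intro k _
      by_cases e1 : k = "text_case" <;> by_cases e2 : k = "csv_path" <;>
        simp [Function.comp, pvRk, e1, e2]
    rw [hfilt2]
    have hcomp : ((fun kv : String × String => pvLine kv.1 kv.2) ∘ fun k => (k, d.getD k ""))
        = fun k => pvLine k (d.getD k "") := rfl
    rw [hcomp]
    -- A's first loop is the rank-0 bucket then the rank-1 bucket
    have hf0 : d.keys.filter (fun k => pvRk k = 0)
        = if "text_case" ∈ d.keys then ["text_case"] else [] := by
      rw [← pvFilter_single d.keys "text_case" hnd]
      apply List.filter_congr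
      intro k _
      simp [pvRk_zero_iff k]
    have hf1 : d.keys.filter (fun k => pvRk k = 1)
        = if "csv_path" ∈ d.keys then ["csv_path"] else [] := by
      rw [← pvFilter_single d.keys "csv_path" hnd]
      apply List.filter_congr
      intro k _
      simp [pvRk_one_iff k]
    have hc1 : d.contains "text_case" = decide ("text_case" ∈ d.keys) :=
      PySem.Dict.contains_eq_decide_mem_keys d "text_case"
    have hc2 : d.contains "csv_path" = decide ("csv_path" ∈ d.keys) :=
      PySem.Dict.contains_eq_decide_mem_keys d "csv_path"
    simp only [List.foldl_cons, List.foldl_nil, List.map_append, hf0, hf1, hc1, hc2]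
    by_cases h1 : "text_case" ∈ d.keys <;> by_cases h2 : "csv_path" ∈ d.keys <;>
      simp [h1, h2]
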